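-- pv_equiv track=rewrite | github.com/RynTrq/DNA-Motif-Finding-Algorithm-Implementation | src/dna_motif/algorithms.py | consensus
-- ===== SOURCE A (Python) =====
-- from typing import Iterable, Sequence
--
-- DNA_ALPHABET = "ACGT"
--
-- def consensus(motifs: Sequence[str]) -> str:
--     """Return the deterministic consensus sequence for a set of motifs.
--
--     Ties are resolved alphabetically by the canonical alphabet order A, C, G, T.
--     This keeps outputs stable across runs and Python versions.
--     """
--
--     if not motifs:
--         raise ValueError("at least one motif is required")
--
--     motif_length = len(motifs[0])
--     if any(len(motif) != motif_length for motif in motifs):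
--         raise ValueError("all motifs must have the same length")
--
--     result: list[str] = []
--     for column in zip(*(motif.upper() for motif in motifs)):
--         counts = {base: column.count(base) for base in DNA_ALPHABET}
--         result.append(max(DNA_ALPHABET, key=lambda base: (counts[base], -DNA_ALPHABET.index(base))))
--     return "".join(result)
-- ===== SOURCE B (Python) =====
-- DNA_ALPHABET = "ACGT"
--
-- def _bump(cell, ch):
--     """Return a copy of the 4-slot count cell with ch's slot incremented."""
--     cell = list(cell)
--     if ch == 'A':
--         cell[0] += 1
--     elif ch == 'C':
--         cell[1] += 1
--     elif ch == 'G':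
--         cell[2] += 1
--     elif ch == 'T':
--         cell[3] += 1
--     return cell
--
-- def consensus(motifs):
--     if not motifs:
--         raise ValueError("at least one motif is required")
--     length = len(motifs[0])
--     if any(len(m) != length for m in motifs):
--         raise ValueError("all motifs must have the same length")
--     counts = [[0, 0, 0, 0] for _ in range(length)]
--     for motif in motifs:
--         counts = [_bump(cell, ch) for cell, ch in zip(counts, motif.upper())]
--     return "".join(DNA_ALPHABET[row.index(max(row))] for row in counts)
-- ===== Notes on version B (the rewrite author's own statement) =====
-- stated objective: alternative
-- what changed: Replaces A's zip-transpose with per-column dict counting and key-based max by a single row-order pass that increments a per-position 4-slot count table, then picks each consensus base as ACGT[row.index(max(row))]; same validation, same A/C/G/T-alphabetical tie-break.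
import Mathlib
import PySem

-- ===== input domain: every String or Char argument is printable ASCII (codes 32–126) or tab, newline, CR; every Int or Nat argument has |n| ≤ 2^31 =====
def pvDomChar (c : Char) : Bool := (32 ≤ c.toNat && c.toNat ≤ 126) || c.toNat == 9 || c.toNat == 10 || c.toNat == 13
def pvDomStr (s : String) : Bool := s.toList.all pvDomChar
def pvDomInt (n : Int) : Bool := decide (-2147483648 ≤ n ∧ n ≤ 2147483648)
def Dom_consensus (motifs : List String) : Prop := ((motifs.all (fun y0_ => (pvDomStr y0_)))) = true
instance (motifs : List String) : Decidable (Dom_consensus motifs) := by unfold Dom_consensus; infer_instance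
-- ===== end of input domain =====

-- B replaces A's zip-transpose + per-column dict/keyed-max by a single row-order pass over a
-- per-position count table and an ACGT[row.index(max(row))] pick (objective: alternative algorithm).

-- ===== PORT A =====

-- zip(*(rows)) ported by hand: emits tuples until the first exhausted row — exact for Python's zip.
def pyZipStar (rows : List (List Char)) : List (List Char) :=
  if h : rows = [] ∨ rows.any (fun r => r.isEmpty) then []
  else (rows.map (fun r => r.headD ' ')) :: pyZipStar (rows.map (fun r => r.tail))
termination_by (rows.headD []).length
decreasing_by
  rw [not_or] at h
  obtain ⟨h1, h2⟩ := h
  cases rows with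
  | nil => exact absurd rfl h1
  | cons r0 rest =>
    simp only [List.map_cons, List.headD_cons]
    have : ¬ (List.any (r0 :: rest) (fun r => r.isEmpty)) := by simp [h2]
    simp only [List.any_cons, Bool.or_eq_true, not_or] at this
    cases r0 with
    | nil => simp at this
    | cons a t => simp

-- Python's tuple comparison key(b) > key(cur) on the (count, -index) pairs (lexicographic, strict).
def keyGt (p q : Int × Int) : Bool := q.1 < p.1 || (p.1 == q.1 && q.2 < p.2)

-- one column: counts = {base: column.count(base) for base in "ACGT"};
-- max("ACGT", key=lambda base: (counts[base], -"ACGT".index(base))) as Python's running max.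
-- "ACGT".index(base) is ported as PySem.Str.find: base is always present, so no ValueError path.
def pickA (col : List Char) : Char :=
  let counts : PySem.Dict Char Int :=
    ['A', 'C', 'G', 'T'].foldl (fun d b => d.insert b ((col.count b : Int))) PySem.Dict.empty
  let key : Char → Int × Int :=
    fun b => (counts.getD b 0, -(PySem.Str.find "ACGT" (String.mk [b])))
  ['C', 'G', 'T'].foldl (fun cur b => if keyGt (key b) (key cur) then b else cur) 'A'

def consensus (motifs : List String) : String :=
  if motifs = [] then ""         -- raise ValueError: excluded by Pre_
  else if motifs.any (fun m => m.toList.length ≠ (motifs.headD "").toList.length) then ""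
                                 -- raise ValueError: excluded by Pre_
  else String.mk ((pyZipStar (motifs.map (fun m => (PySem.Str.upper m).toList))).map pickA)

-- ===== PORT B =====

-- _bump(cell, ch): copy of the 4-slot count cell with ch's slot incremented
def bumpCell (cell : List Int) (ch : Char) : List Int :=
  if ch = 'A' then PySem.List.pySetD cell 0 (PySem.List.pyGetD cell 0 0 + 1)
  else if ch = 'C' then PySem.List.pySetD cell 1 (PySem.List.pyGetD cell 1 0 + 1)
  else if ch = 'G' then PySem.List.pySetD cell 2 (PySem.List.pyGetD cell 2 0 + 1)
  else if ch = 'T' then PySem.List.pySetD cell 3 (PySem.List.pyGetD cell 3 0 + 1)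
  else cell

-- "ACGT"[row.index(max(row))]; row always has 4 entries and contains max(row), so the
-- Option defaults (Python's error paths of max/index/[]) are never taken.
def pickRow (row : List Int) : Char :=
  let m := (PySem.List.max? row (fun x => x)).getD 0
  (PySem.Str.pyGet? "ACGT" (((PySem.List.index? row m).getD 0 : Nat) : Int)).getD 'A'

def consensus_alt (motifs : List String) : String :=
  if motifs = [] then ""         -- raise ValueError: excluded by Pre_
  else if motifs.any (fun m => m.toList.length ≠ (motifs.headD "").toList.length) then ""
                                 -- raise ValueError: excluded by Pre_
  else String.mk
    ((motifs.foldl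
        (fun t m => ((t.zip (PySem.Str.upper m).toList).map (fun p => bumpCell p.1 p.2)))
        (List.replicate (motifs.headD "").toList.length [0, 0, 0, 0])).map pickRow)

-- ===== PRECONDITION & SPEC =====
-- Pre_ excludes exactly the inputs where A raises ValueError: the empty motif list and
-- motif lists with unequal string lengths (B raises there too).
def Pre_consensus (motifs : List String) : Prop :=
  motifs ≠ [] ∧ ∀ m ∈ motifs, m.toList.length = (motifs.headD "").toList.length
instance (motifs : List String) : Decidable (Pre_consensus motifs) := by
  unfold Pre_consensus; infer_instance

def pvWitness_consensus : List String := ["ACgt", "aCGT", "A-C?"]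

def Spec_consensus (motifs : List String) (out : String) : Prop := out = consensus_alt motifs
instance (motifs : List String) (out : String) : Decidable (Spec_consensus motifs out) := by
  unfold Spec_consensus; infer_instance

-- ===== CLAIM (what is proved, stated in full; the proofs are below) =====
def Claim_equal_consensus : Prop :=
  ∀ (motifs : List String), Dom_consensus motifs → Pre_consensus motifs →
    Spec_consensus motifs (consensus motifs)

-- ===== LEMMAS AND PROOFS =====

-- the per-column count vector B maintains
def cnts (col : List Char) : List Int :=
  [(col.count 'A' : Int), (col.count 'C' : Int), (col.count 'G' : Int), (col.count 'T' : Int)]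

-- zip(*rows) of a nonempty rectangle is the list of its L columns
theorem pyZipStar_rect (L : Nat) :
    ∀ rows : List (List Char), rows ≠ [] → (∀ r ∈ rows, r.length = L) →
      pyZipStar rows = (List.range L).map (fun j => rows.map (fun r => r.getD j ' ')) := by
  induction L with
  | zero =>
    intro rows hne hlen
    rw [pyZipStar]
    have hany : rows.any (fun r => r.isEmpty) = true := by
      cases rows with
      | nil => exact absurd rfl hne
      | cons r0 rest =>
        have h0 := hlen r0 (by simp)
        have : r0 = [] := List.eq_nil_of_length_eq_zero h0
        subst this; simp
    rw [dif_pos (Or.inr hany)]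
    simp
  | succ n ih =>
    intro rows hne hlen
    rw [pyZipStar]
    have hno : ¬ (rows = [] ∨ rows.any (fun r => r.isEmpty) = true) := by
      refine not_or.mpr ⟨hne, ?_⟩
      simp only [List.any_eq_true, not_exists, not_and]
      intro r hr
      have := hlen r hr
      cases r with
      | nil => simp at this
      | cons a t => simp
    rw [dif_neg hno]
    have htails : ∀ r ∈ rows.map (fun r => r.tail), r.length = n := by
      intro r hr
      simp only [List.mem_map] at hr
      obtain ⟨r0, hr0, rfl⟩ := hr
      have := hlen r0 hr0
      simp [List.length_tail, this]
    have hne' : rows.map (fun r => r.tail) ≠ [] := by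
      cases rows <;> simp_all
    rw [ih _ hne' htails, List.range_succ_eq_map]
    simp only [List.map_cons, List.map_map]
    refine congrArg₂ List.cons ?_ ?_
    · apply List.map_congr_left
      intro r _
      cases r <;> rfl
    · apply List.map_congr_left
      intro j _
      simp only [Function.comp]
      apply List.map_congr_left
      intro r _
      cases r <;> rfl

-- bump of a count cell records one more column character
theorem bumpCell_cnts (col : List Char) (ch : Char) :
    bumpCell (cnts col) ch = cnts (col ++ [ch]) := by
  unfold bumpCell cnts
  by_cases hA : ch = 'A'
  · subst hA; simp [PySem.List.pySetD, PySem.List.pySet?, PySem.List.pyIdx?, PySem.List.pyGetD,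
      PySem.List.pyGet?, List.count_append]
  · by_cases hC : ch = 'C'
    · subst hC; simp [PySem.List.pySetD, PySem.List.pySet?, PySem.List.pyIdx?, PySem.List.pyGetD,
        PySem.List.pyGet?, List.count_append, hA]
    · by_cases hG : ch = 'G'
      · subst hG; simp [PySem.List.pySetD, PySem.List.pySet?, PySem.List.pyIdx?, PySem.List.pyGetD,
          PySem.List.pyGet?, List.count_append, hA, hC]
      · by_cases hT : ch = 'T'
        · subst hT; simp [PySem.List.pySetD, PySem.List.pySet?, PySem.List.pyIdx?,
            PySem.List.pyGetD, PySem.List.pyGet?, List.count_append, hA, hC, hG]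
        · simp [hA, hC, hG, hT, List.count_append,
            List.count_singleton, Ne.symm hA, Ne.symm hC, Ne.symm hG, Ne.symm hT]

-- the dict lookup in pickA's key, as an if-chain (insertion order T,G,C,A outermost-first)
def keyChain (a c g t : Int) (b : Char) : Int × Int :=
  ((if b = 'T' then t else if b = 'G' then g else if b = 'C' then c else if b = 'A' then a else 0),
   -(PySem.Str.find "ACGT" (String.mk [b])))

theorem pickA_eq_chain (col : List Char) :
    pickA col = ['C', 'G', 'T'].foldl
      (fun cur b => if keyGt (keyChain (col.count 'A') (col.count 'C') (col.count 'G') (col.count 'T') b)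
                             (keyChain (col.count 'A') (col.count 'C') (col.count 'G') (col.count 'T') cur)
                    then b else cur) 'A' := by
  unfold pickA
  have hkey : ∀ b : Char,
      ((['A', 'C', 'G', 'T'].foldl (fun d b => d.insert b ((col.count b : Int)))
          PySem.Dict.empty).getD b 0,
        -(PySem.Str.find "ACGT" (String.mk [b])))
      = keyChain (col.count 'A') (col.count 'C') (col.count 'G') (col.count 'T') b := by
    intro b
    simp only [List.foldl, keyChain]
    simp [PySem.Dict.getD_insert]
  simp only [hkey]

set_option maxHeartbeats 1000000 in
theorem pick_nums (a c g t : Int) :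
    ['C', 'G', 'T'].foldl
      (fun cur b => if keyGt (keyChain a c g t b) (keyChain a c g t cur) then b else cur) 'A'
    = pickRow [a, c, g, t] := by
  have kA : keyChain a c g t 'A' = (a, 0) := by simp [keyChain]; decide
  have kC : keyChain a c g t 'C' = (c, -1) := by simp [keyChain]; decide
  have kG : keyChain a c g t 'G' = (g, -2) := by simp [keyChain]; decide
  have kT : keyChain a c g t 'T' = (t, -3) := by simp [keyChain]; decide
  have mx : (PySem.List.max? [a, c, g, t] (fun x => x)).getD 0 = max (max (max a c) g) t := by
    rw [PySem.List.max?_id_cons]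
    simp [List.foldl]
  have idx : ∀ m : Int, PySem.List.index? [a, c, g, t] m =
      (if a = m then some 0 else if c = m then some 1 else if g = m then some 2
       else if t = m then some 3 else none) := by
    intro m
    simp only [PySem.List.index?, List.idxOf?, List.findIdx?_cons, List.findIdx?_nil,
      beq_iff_eq]
    split_ifs <;> rfl
  have gtP : ∀ x y i j : Int, i < j → y < x → keyGt (x, i) (y, j) = true := by
    intro x y i j _ h2
    simp only [keyGt, Bool.or_eq_true, Bool.and_eq_true, decide_eq_true_eq, beq_iff_eq]
    exact Or.inl h2
  have gtN : ∀ x y i j : Int, i < j → ¬ y < x → keyGt (x, i) (y, j) = false := by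
    intro x y i j h1 h2
    simp only [keyGt, Bool.or_eq_false_iff, Bool.and_eq_false_iff, decide_eq_false_iff_not,
      beq_eq_false_iff_ne, ne_eq]
    constructor
    · exact h2
    · by_cases hx : x = y
      · right; simp [decide_eq_false]; omega
      · left; simp [hx]
  simp only [List.foldl, pickRow, mx, idx, kA, kC, kG, kT]
  by_cases h1 : a < c
  · simp only [gtP c a (-1) 0 (by omega) h1, eq_self_iff_true, if_true, kC]
    by_cases h2 : c < g
    · simp only [gtP g c (-2) (-1) (by omega) h2, eq_self_iff_true, if_true, kG]
      by_cases h3 : g < t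
      · simp only [gtP t g (-3) (-2) (by omega) h3, eq_self_iff_true, if_true]
        split_ifs <;> first | omega | decide
      · simp only [gtN t g (-3) (-2) (by omega) h3, Bool.false_eq_true, if_false]
        split_ifs <;> first | omega | decide
    · simp only [gtN g c (-2) (-1) (by omega) h2, Bool.false_eq_true, if_false, kC]
      by_cases h3 : c < t
      · simp only [gtP t c (-3) (-1) (by omega) h3, eq_self_iff_true, if_true]
        split_ifs <;> first | omega | decide
      · simp only [gtN t c (-3) (-1) (by omega) h3, Bool.false_eq_true, if_false]
        split_ifs <;> first | omega | decide
  · simp only [gtN c a (-1) 0 (by omega) h1, Bool.false_eq_true, if_false, kA]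
    by_cases h2 : a < g
    · simp only [gtP g a (-2) 0 (by omega) h2, eq_self_iff_true, if_true, kG]
      by_cases h3 : g < t
      · simp only [gtP t g (-3) (-2) (by omega) h3, eq_self_iff_true, if_true]
        split_ifs <;> first | omega | decide
      · simp only [gtN t g (-3) (-2) (by omega) h3, Bool.false_eq_true, if_false]
        split_ifs <;> first | omega | decide
    · simp only [gtN g a (-2) 0 (by omega) h2, Bool.false_eq_true, if_false, kA]
      by_cases h3 : a < t
      · simp only [gtP t a (-3) 0 (by omega) h3, eq_self_iff_true, if_true]
        split_ifs <;> first | omega | decide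
      · simp only [gtN t a (-3) 0 (by omega) h3, Bool.false_eq_true, if_false]
        split_ifs <;> first | omega | decide

theorem pick_col (col : List Char) : pickA col = pickRow (cnts col) := by
  rw [pickA_eq_chain, cnts]
  exact pick_nums _ _ _ _

-- one step of B's row loop, pointwise over the positions
theorem zip_step (L : Nat) (f : Nat → List Int) (r : List Char) (hr : r.length = L) :
    (((List.range L).map f).zip r).map (fun p => bumpCell p.1 p.2)
    = (List.range L).map (fun j => bumpCell (f j) (r.getD j ' ')) := by
  apply List.ext_getElem
  · simp [hr]
  · intro j h1 h2
    simp only [List.length_map, List.length_zip, List.length_range, hr, Nat.min_self] at h1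
    simp [List.getElem_zip, List.getD_eq_getElem?_getD, List.getElem?_eq_getElem, hr, h1]

-- B's whole row loop maintains the per-column count table
theorem table_inv (L : Nat) :
    ∀ (rs : List (List Char)) (g : Nat → List Char), (∀ r ∈ rs, r.length = L) →
      rs.foldl (fun t r => ((t.zip r).map (fun p => bumpCell p.1 p.2)))
        ((List.range L).map (fun j => cnts (g j)))
      = (List.range L).map (fun j => cnts (g j ++ rs.map (fun r => r.getD j ' '))) := by
  intro rs
  induction rs with
  | nil => intro g _; simp
  | cons r rest ih =>
    intro g hlen
    simp only [List.foldl_cons]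
    rw [zip_step L (fun j => cnts (g j)) r (hlen r (by simp))]
    have : (List.range L).map (fun j => bumpCell (cnts (g j)) (r.getD j ' '))
        = (List.range L).map (fun j => cnts (g j ++ [r.getD j ' '])) := by
      apply List.map_congr_left
      intro j _
      exact bumpCell_cnts _ _
    rw [this, ih (fun j => g j ++ [r.getD j ' ']) (fun r' hr' => hlen r' (by simp [hr']))]
    apply List.map_congr_left
    intro j _
    simp

theorem upper_length (m : String) : (PySem.Str.upper m).toList.length = m.toList.length := by
  simp [PySem.Str.toList_upper, PySem.Chars.upper]

-- ===== VERDICT (by name: the statement is the Claim_ definition above) =====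
theorem consensus_spec : Claim_equal_consensus := by
  unfold Claim_equal_consensus
  intro motifs _ hpre
  obtain ⟨hne, hlen⟩ := hpre
  unfold Spec_consensus consensus consensus_alt
  rw [if_neg hne, if_neg hne]
  have hany : (motifs.any fun m => decide (m.toList.length ≠ (motifs.headD "").toList.length))
      = false := by
    simp only [List.any_eq_false, decide_eq_true_eq]
    intro m hm
    simp [hlen m hm]
  simp only [hany, Bool.false_eq_true, if_false]
  set L := (motifs.headD "").toList.length with hL
  have hrowsne : motifs.map (fun m => (PySem.Str.upper m).toList) ≠ [] := by
    cases motifs <;> simp_all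
  have hrowslen : ∀ r ∈ motifs.map (fun m => (PySem.Str.upper m).toList), r.length = L := by
    intro r hr
    simp only [List.mem_map] at hr
    obtain ⟨m, hm, rfl⟩ := hr
    rw [upper_length]
    exact hlen m hm
  rw [pyZipStar_rect L _ hrowsne hrowslen]
  have hfold : List.foldl
        (fun t m => ((t.zip (PySem.Str.upper m).toList).map (fun p => bumpCell p.1 p.2)))
        (List.replicate L ([0, 0, 0, 0] : List Int)) motifs
      = List.foldl (fun t r => ((t.zip r).map (fun p => bumpCell p.1 p.2)))
        (List.replicate L ([0, 0, 0, 0] : List Int))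
        (motifs.map (fun m => (PySem.Str.upper m).toList)) := by
    rw [List.foldl_map]
  rw [hfold]
  have hinit : (List.replicate L ([0, 0, 0, 0] : List Int))
      = (List.range L).map (fun _ => cnts (([] : List Char))) := by
    have : cnts ([] : List Char) = [0, 0, 0, 0] := by simp [cnts]
    simp [this, List.eq_replicate_iff]
  rw [hinit, table_inv L _ (fun _ => ([] : List Char)) hrowslen]
  simp only [List.map_map]
  apply congrArg
  apply List.map_congr_left
  intro j _
  simp only [Function.comp, List.nil_append]
  exact pick_col _
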